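-- pv_equiv track=rewrite | github.com/lohitsuri1/Multimodal-Pipeline | shorts_extractor.py | _parse_titles_thumbnails
-- ===== SOURCE A (Python) =====
-- from typing import Any, Dict, List
--
-- def _parse_titles_thumbnails(raw: str) -> Dict[str, List[str]]:
--     """Parse title and thumbnail options from LLM response."""
--     titles: List[str] = []
--     thumbnails: List[str] = []
--     current_section = None
--
--     for line in raw.split("\n"):
--         stripped = line.strip()
--         if not stripped:
--             continue
--         upper = stripped.upper()
--         if upper.startswith("TITLES:") or upper == "TITLES":
--             current_section = "titles"
--         elif upper.startswith("THUMBNAILS:") or upper == "THUMBNAILS":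
--             current_section = "thumbnails"
--         elif stripped[0].isdigit() and ". " in stripped:
--             content = stripped.split(". ", 1)[1].strip()
--             if current_section == "titles":
--                 titles.append(content)
--             elif current_section == "thumbnails":
--                 thumbnails.append(content)
--
--     return {"titles": titles, "thumbnails": thumbnails}
-- ===== SOURCE B (Python) =====
-- from typing import Dict, List
--
--
-- def _parse_titles_thumbnails(raw: str) -> Dict[str, List[str]]:
--     """Parse title and thumbnail options from LLM response.
--
--     Two-phase decomposition: pre-clean the lines once, then make one
--     independent collection pass per section.
--     """
--
--     def section_of(s: str) -> str | None:
--         u = s.upper()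
--         if u.startswith("TITLES:") or u == "TITLES":
--             return "titles"
--         if u.startswith("THUMBNAILS:") or u == "THUMBNAILS":
--             return "thumbnails"
--         return None
--
--     def collect(lines: List[str], want: str) -> List[str]:
--         active = False
--         out: List[str] = []
--         for s in lines:
--             sec = section_of(s)
--             if sec is not None:
--                 active = sec == want
--             elif active and s[0].isdigit() and ". " in s:
--                 out.append(s.split(". ", 1)[1].strip())
--         return out
--
--     lines = [s for s in (l.strip() for l in raw.split("\n")) if s]
--     return {"titles": collect(lines, "titles"), "thumbnails": collect(lines, "thumbnails")}
-- ===== Notes on version B (the rewrite author's own statement) =====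
-- stated objective: alternative
-- what changed: Replaces A's single interleaved fold carrying (titles, thumbnails, current_section) with a pre-cleaning pass that strips and drops blank lines once, followed by two independent per-section collection passes each tracking only a boolean flag for whether its section is the most recent header.
import Mathlib
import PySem

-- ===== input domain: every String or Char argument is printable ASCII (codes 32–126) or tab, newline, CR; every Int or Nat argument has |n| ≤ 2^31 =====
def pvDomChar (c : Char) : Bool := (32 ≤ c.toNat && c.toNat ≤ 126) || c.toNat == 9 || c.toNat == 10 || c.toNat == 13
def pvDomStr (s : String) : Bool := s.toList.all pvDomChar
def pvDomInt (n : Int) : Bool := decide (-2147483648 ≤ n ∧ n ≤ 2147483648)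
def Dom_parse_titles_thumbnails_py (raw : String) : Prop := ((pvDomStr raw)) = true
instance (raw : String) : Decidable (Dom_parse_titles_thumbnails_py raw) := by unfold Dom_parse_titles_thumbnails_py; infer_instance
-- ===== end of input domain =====

-- B replaces A's single interleaved fold (two accumulators + current-section state) with a
-- pre-cleaning pass followed by two independent per-section collection passes (objective: alternative).

-- ===== PORT A =====
-- one loop over raw lines, state = (titles, thumbnails, current_section)
def pvGoA : List String → List String → List String → Option String → (List String × List String)
  | [], titles, thumbnails, _ => (titles, thumbnails)
  | line :: rest, titles, thumbnails, cur =>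
    let stripped := PySem.Str.strip line
    if stripped == "" then pvGoA rest titles thumbnails cur
    else
      let upper := PySem.Str.upper stripped
      if PySem.Str.startswith upper "TITLES:" || upper == "TITLES" then
        pvGoA rest titles thumbnails (some "titles")
      else if PySem.Str.startswith upper "THUMBNAILS:" || upper == "THUMBNAILS" then
        pvGoA rest titles thumbnails (some "thumbnails")
      else if (match PySem.Str.pyGet? stripped 0 with
               | some c => PySem.Str.isdigit c
               | none => false) && PySem.Str.isIn ". " stripped then
        -- stripped.split(". ", 1)[1].strip(); the [1] access is guarded by '". " in stripped'
        let content := PySem.Str.strip (((PySem.Str.splitMax? stripped ". " 1).getD []).getD 1 "")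
        if cur == some "titles" then pvGoA rest (titles ++ [content]) thumbnails cur
        else if cur == some "thumbnails" then pvGoA rest titles (thumbnails ++ [content]) cur
        else pvGoA rest titles thumbnails cur
      else pvGoA rest titles thumbnails cur

def parse_titles_thumbnails_py (raw : String) : List (String × List String) :=
  let r := pvGoA ((PySem.Str.split? raw "\n").getD []) [] [] none
  [("titles", r.1), ("thumbnails", r.2)]

-- ===== PORT B =====
def pvSectionOf (s : String) : Option String :=
  let u := PySem.Str.upper s
  if PySem.Str.startswith u "TITLES:" || u == "TITLES" then some "titles"
  else if PySem.Str.startswith u "THUMBNAILS:" || u == "THUMBNAILS" then some "thumbnails"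
  else none

def pvCollect : List String → String → Bool → List String
  | [], _, _ => []
  | s :: rest, want, active =>
    match pvSectionOf s with
    | some sec => pvCollect rest want (sec == want)
    | none =>
      if active && ((match PySem.Str.pyGet? s 0 with
                     | some c => PySem.Str.isdigit c
                     | none => false) && PySem.Str.isIn ". " s) then
        PySem.Str.strip (((PySem.Str.splitMax? s ". " 1).getD []).getD 1 "")
          :: pvCollect rest want active
      else pvCollect rest want active

def parse_titles_thumbnails_py_alt (raw : String) : List (String × List String) :=
  let lines := (((PySem.Str.split? raw "\n").getD []).map PySem.Str.strip).filter (· ≠ "")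
  [("titles", pvCollect lines "titles" false), ("thumbnails", pvCollect lines "thumbnails" false)]

-- ===== PRECONDITION & SPEC =====
def Spec_parse_titles_thumbnails_py (raw : String) (out : List (String × List String)) : Prop := out = parse_titles_thumbnails_py_alt raw
instance (raw : String) (out : List (String × List String)) : Decidable (Spec_parse_titles_thumbnails_py raw out) := by unfold Spec_parse_titles_thumbnails_py; infer_instance

-- ===== CLAIM (what is proved, stated in full; the proofs are below) =====
def Claim_equal_parse_titles_thumbnails_py : Prop := ∀ (raw : String), Dom_parse_titles_thumbnails_py raw → Spec_parse_titles_thumbnails_py raw (parse_titles_thumbnails_py raw)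

-- ===== LEMMAS AND PROOFS =====

-- A's interleaved fold equals B's two independent passes over the pre-cleaned lines,
-- for any starting accumulators and section state.
theorem pvGoA_eq_collect (ls : List String) (t th : List String) (cur : Option String) :
    pvGoA ls t th cur =
      (t ++ pvCollect ((ls.map PySem.Str.strip).filter (· ≠ "")) "titles" (cur == some "titles"),
       th ++ pvCollect ((ls.map PySem.Str.strip).filter (· ≠ "")) "thumbnails" (cur == some "thumbnails")) := by
  induction ls generalizing t th cur with
  | nil => simp [pvGoA, pvCollect]
  | cons line rest ih =>
    by_cases h0 : PySem.Str.strip line = ""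
    · simp [pvGoA, h0, ih]
    · have h0' : (PySem.Str.strip line == "") = false := by simpa using h0
      have hf : ((line :: rest).map PySem.Str.strip).filter (· ≠ "") =
          PySem.Str.strip line :: ((rest.map PySem.Str.strip).filter (· ≠ "")) := by
        simp [h0]
      rw [hf]
      simp only [pvGoA, pvCollect, pvSectionOf, ih, h0', Bool.false_eq_true, if_false]
      split_ifs <;> simp_all [List.append_assoc]

-- ===== VERDICT (by name: the statement is the Claim_ definition above) =====
theorem parse_titles_thumbnails_py_spec : Claim_equal_parse_titles_thumbnails_py := by
  intro raw _
  unfold Spec_parse_titles_thumbnails_py parse_titles_thumbnails_py parse_titles_thumbnails_py_alt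
  rw [pvGoA_eq_collect]
  simp
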